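-- pv_equiv track=rewrite | github.com/Ac5000/2024-advent-of-code | day20/day20part2.py | make_possible_offsets
-- ===== SOURCE A (Python) =====
-- from collections import namedtuple
--
-- Coord = namedtuple("Coord", ["x", "y"])
--
-- def make_possible_offsets(max_dist: int = 2) -> dict[Coord, int]:
--     """Calculate offsets for all positions that can be reached.
--
--     Returns:
--         Dictionary where keys are offsets and values are the distances to them.
--     """
--     ret_dict: dict[Coord, int] = {}
--     positives = range(0, max_dist + 1)
--     negatives = range(0, (max_dist + 1) * -1, -1)
--     # Right
--     for i, x in enumerate(positives):
--         # and Up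
--         for j, y in enumerate(range(0, max_dist + 1 - x)):
--             ret_dict[Coord(x, y)] = i + j
--         # and Down
--         for j, y in enumerate(range(0, -1 * (max_dist + 1 - x), -1)):
--             ret_dict[Coord(x, y)] = i + j
--     # Left
--     for i, x in enumerate(negatives):
--         # and Up
--         for j, y in enumerate(range(0, max_dist + 1 + x)):
--             ret_dict[Coord(x, y)] = i + j
--         # and Down
--         for j, y in enumerate(range(0, -1 * (max_dist + 1 + x), -1)):
--             ret_dict[Coord(x, y)] = i + j
--
--     return ret_dict
-- ===== SOURCE B (Python) =====
-- from collections import namedtuple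
--
-- Coord = namedtuple("Coord", ["x", "y"])
--
-- def make_possible_offsets(max_dist: int = 2) -> dict[Coord, int]:
--     """Calculate offsets for all positions that can be reached.
--
--     Materialise only the first quadrant (x >= 0, y >= 0) with its distances,
--     then derive the other three quadrants by reflecting that data across the
--     axes; the dict is built by one comprehension, no per-key mutation loop.
--     """
--     quad = [[(x, y, x + y) for y in range(max_dist - x + 1)]
--             for x in range(max_dist + 1)]
--     right = [row + [(x, -y, d) for (x, y, d) in row[1:]] for row in quad]
--     left = [[(-x, y, d) for (x, y, d) in row] for row in right[1:]]
--     return {Coord(x, y): d for row in right + left for (x, y, d) in row}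
-- ===== Notes on version B (the rewrite author's own statement) =====
-- stated objective: alternative
-- what changed: B materialises only the first quadrant as rows of (x, y, distance) triples and derives the other three quadrants by reflecting that data across the x- and y-axes, building the dict with a single comprehension, instead of A's four separate quadrant scans that accumulate enumerate indices, recompute every entry, and redundantly re-insert the axis keys.
import Mathlib
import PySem

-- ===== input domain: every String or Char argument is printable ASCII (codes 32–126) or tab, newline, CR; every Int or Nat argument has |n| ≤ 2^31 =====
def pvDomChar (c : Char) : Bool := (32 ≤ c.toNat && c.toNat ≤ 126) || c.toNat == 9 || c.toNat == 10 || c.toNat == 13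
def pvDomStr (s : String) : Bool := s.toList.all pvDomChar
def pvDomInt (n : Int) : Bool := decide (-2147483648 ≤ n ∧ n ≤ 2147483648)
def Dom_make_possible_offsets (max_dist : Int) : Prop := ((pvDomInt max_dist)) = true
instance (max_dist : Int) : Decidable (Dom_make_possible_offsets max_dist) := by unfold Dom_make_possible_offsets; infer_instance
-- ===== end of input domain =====

-- B materialises only the first quadrant and derives the other three by reflecting
-- that data across the axes, instead of A's four index-accumulating scans (objective: alternative).

-- ===== PORT A =====
-- the returned dict[Coord, int] is the flattened items list (x, y, distance) in insertion order
def make_possible_offsets (max_dist : Int) : List (Int × Int × Int) :=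
  let positives := PySem.List.pyRange 0 (max_dist + 1) 1
  let negatives := PySem.List.pyRange 0 ((max_dist + 1) * (-1)) (-1)
  let d0 : PySem.Dict (Int × Int) Int := PySem.Dict.empty
  let d1 := (PySem.List.enumerate positives).foldl (fun d ix =>
    let d' := (PySem.List.enumerate (PySem.List.pyRange 0 (max_dist + 1 - ix.2) 1)).foldl
        (fun d jy => d.insert (ix.2, jy.2) (ix.1 + jy.1)) d
    (PySem.List.enumerate (PySem.List.pyRange 0 ((-1) * (max_dist + 1 - ix.2)) (-1))).foldl
        (fun d jy => d.insert (ix.2, jy.2) (ix.1 + jy.1)) d') d0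
  let d2 := (PySem.List.enumerate negatives).foldl (fun d ix =>
    let d' := (PySem.List.enumerate (PySem.List.pyRange 0 (max_dist + 1 + ix.2) 1)).foldl
        (fun d jy => d.insert (ix.2, jy.2) (ix.1 + jy.1)) d
    (PySem.List.enumerate (PySem.List.pyRange 0 ((-1) * (max_dist + 1 + ix.2)) (-1))).foldl
        (fun d jy => d.insert (ix.2, jy.2) (ix.1 + jy.1)) d') d1
  d2.items.map (fun p => (p.1.1, p.1.2, p.2))

-- ===== PORT B =====
-- quadrant-I rows of (x, y, distance), widened across the x-axis, left half by
-- reflecting the right half across the y-axis, one dict comprehension at the end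
def make_possible_offsets_alt (max_dist : Int) : List (Int × Int × Int) :=
  let quad := (PySem.List.pyRange 0 (max_dist + 1) 1).map (fun x =>
    (PySem.List.pyRange 0 (max_dist - x + 1) 1).map (fun y => (x, y, x + y)))
  let right := quad.map (fun row =>
    row ++ (PySem.List.slice row (some 1) none).map (fun t => (t.1, -t.2.1, t.2.2)))
  let left := (PySem.List.slice right (some 1) none).map (fun row =>
    row.map (fun t => (-t.1, t.2.1, t.2.2)))
  let d := (right ++ left).foldl (fun d row =>
      row.foldl (fun d t => d.insert (t.1, t.2.1) t.2.2) d)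
    (PySem.Dict.empty : PySem.Dict (Int × Int) Int)
  d.items.map (fun p => (p.1.1, p.1.2, p.2))

-- ===== PRECONDITION & SPEC =====
def Spec_make_possible_offsets (max_dist : Int) (out : List (Int × Int × Int)) : Prop := out = make_possible_offsets_alt max_dist
instance (max_dist : Int) (out : List (Int × Int × Int)) : Decidable (Spec_make_possible_offsets max_dist out) := by unfold Spec_make_possible_offsets; infer_instance

-- ===== CLAIM (what is proved, stated in full; the proofs are below) =====
def Claim_equal_make_possible_offsets : Prop := ∀ (max_dist : Int), Dom_make_possible_offsets max_dist → Spec_make_possible_offsets max_dist (make_possible_offsets max_dist)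

-- ===== LEMMAS AND PROOFS =====
-- canonical entry list: row x (for x = 0,1,…,M,-1,…,-M) holds the keys (x,y) for
-- y = 0,1,…,M-|x|,-1,…,-(M-|x|), each with value |x|+|y|; both ports produce exactly it

def pvYs (k : Nat) : List Int :=
  (List.range (k+1)).map (fun (j : Nat) => (j : Int)) ++ (List.range k).map (fun (j : Nat) => (-1 : Int) - j)

def pvRow (M : Nat) (x : Int) : List ((Int × Int) × Int) :=
  (pvYs (M - x.natAbs)).map (fun y => ((x, y), (|x| + |y| : Int)))

def pvIns : PySem.Dict (Int × Int) Int → ((Int × Int) × Int) → PySem.Dict (Int × Int) Int :=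
  fun d p => d.insert p.1 p.2

def pvUp (M : Nat) (x : Int) : List ((Int × Int) × Int) :=
  (List.range (M - x.natAbs + 1)).map (fun (j : Nat) => ((x, (j : Int)), ((x.natAbs : Int) + j)))

def pvDown (M : Nat) (x : Int) : List ((Int × Int) × Int) :=
  (List.range (M - x.natAbs + 1)).map (fun (j : Nat) => ((x, -(j : Int)), ((x.natAbs : Int) + j)))

def pvRowOp (M : Nat) (x : Int) (d : PySem.Dict (Int × Int) Int) : PySem.Dict (Int × Int) Int :=
  (pvDown M x).foldl pvIns ((pvUp M x).foldl pvIns d)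

lemma pvFoldl_insert_fresh (L : List ((Int × Int) × Int)) (d : PySem.Dict (Int × Int) Int)
    (hfresh : ∀ p ∈ L, ∀ q ∈ d.items, q.1 ≠ p.1) (hnd : (L.map Prod.fst).Nodup) :
    L.foldl pvIns d = ⟨d.items ++ L⟩ := by
  induction L generalizing d with
  | nil => simp
  | cons p t ih =>
    simp only [List.foldl_cons]
    have hc : d.contains p.1 = false := by
      simp only [PySem.Dict.contains, List.any_eq_false]
      intro q hq
      simpa using hfresh p (by simp) q hq
    have hins : pvIns d p = ⟨d.items ++ [p]⟩ :=
      PySem.Dict.ext (PySem.Dict.items_insert_of_not_contains d p.2 hc)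
    rw [hins, ih]
    · simp
    · intro r hr q hq
      rcases List.mem_append.1 hq with hq | hq
      · exact hfresh r (by simp [hr]) q hq
      · simp only [List.mem_singleton] at hq
        subst hq
        simp only [List.map_cons, List.nodup_cons, List.mem_map] at hnd
        intro he
        exact hnd.1 ⟨r, hr, he.symm⟩
    · simp only [List.map_cons, List.nodup_cons] at hnd
      exact hnd.2

lemma pvInsert_noop (d : PySem.Dict (Int × Int) Int) (k : Int × Int) (v : Int)
    (hmem : (k, v) ∈ d.items) (hval : ∀ q ∈ d.items, q.1 = k → q.2 = v) :
    d.insert k v = d := by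
  have hc : d.contains k = true := by
    simp only [PySem.Dict.contains, List.any_eq_true]
    exact ⟨(k, v), hmem, by simp⟩
  apply PySem.Dict.ext
  show (d.insert k v).items = d.items
  unfold PySem.Dict.insert
  rw [if_pos hc]
  show List.map _ d.items = d.items
  conv_rhs => rw [← List.map_id d.items]
  apply List.map_congr_left
  intro q hq
  by_cases h : q.1 = k
  · rw [if_pos (by simpa using h)]
    have := hval q hq h
    simp [← h, ← this]
  · rw [if_neg (by simpa using h)]
    rfl

lemma pvFoldl_insert_noop (L : List ((Int × Int) × Int)) (d : PySem.Dict (Int × Int) Int)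
    (h : ∀ p ∈ L, p ∈ d.items ∧ ∀ q ∈ d.items, q.1 = p.1 → q.2 = p.2) :
    L.foldl pvIns d = d := by
  induction L with
  | nil => rfl
  | cons p t ih =>
    simp only [List.foldl_cons]
    have h1 := h p (by simp)
    show t.foldl pvIns (d.insert p.1 p.2) = d
    rw [pvInsert_noop d p.1 p.2 h1.1 h1.2]
    exact ih (fun q hq => h q (by simp [hq]))

-- the key per-row lemma: a fresh row appends pvRow

lemma pvRowOp_fresh (M : Nat) (x : Int) (d : PySem.Dict (Int × Int) Int)
    (hfresh : ∀ q ∈ d.items, q.1.1 ≠ x) :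
    pvRowOp M x d = ⟨d.items ++ pvRow M x⟩ := by
  unfold pvRowOp
  have hup : (pvUp M x).foldl pvIns d = ⟨d.items ++ pvUp M x⟩ := by
    apply pvFoldl_insert_fresh
    · intro p hp q hq he
      apply hfresh q hq
      simp only [pvUp, List.mem_map] at hp
      obtain ⟨j, _, rfl⟩ := hp
      rw [he]
    · unfold pvUp
      rw [List.map_map]
      exact List.nodup_range.map (fun a b h => by
        simp only [Function.comp_apply, Prod.mk.injEq] at h; exact_mod_cast h.2)
  rw [hup]
  -- split pvDown into its head (j = 0, a same-value overwrite) and tail (fresh)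
  have hsplit : pvDown M x = ((x, (0:Int)), (x.natAbs : Int)) ::
      (List.range (M - x.natAbs)).map (fun (j : Nat) => ((x, -((j:Int)+1)), ((x.natAbs : Int) + j + 1))) := by
    unfold pvDown
    rw [List.range_succ_eq_map, List.map_cons, List.map_map]
    congr 1
  rw [hsplit]
  simp only [List.foldl_cons]
  have hhead : pvIns ⟨d.items ++ pvUp M x⟩ ((x, (0:Int)), (x.natAbs : Int)) = ⟨d.items ++ pvUp M x⟩ := by
    apply pvInsert_noop
    · apply List.mem_append.2; right
      unfold pvUp
      exact List.mem_map.2 ⟨0, by simp, by simp⟩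
    · intro q hq hk
      rcases List.mem_append.1 hq with hq | hq
      · exact absurd (by rw [hk]) (hfresh q hq)
      · simp only [pvUp, List.mem_map] at hq
        obtain ⟨j, _, rfl⟩ := hq
        simp only [Prod.mk.injEq] at hk
        have : (j:Int) = 0 := hk.2
        simp [show j = 0 by exact_mod_cast this]
  rw [hhead]
  have htail : (List.map (fun (j : Nat) => ((x, -((j:Int)+1)), ((x.natAbs : Int) + j + 1))) (List.range (M - x.natAbs))).foldl
      pvIns ⟨d.items ++ pvUp M x⟩
      = ⟨(d.items ++ pvUp M x) ++ (List.range (M - x.natAbs)).map (fun (j : Nat) => ((x, -((j:Int)+1)), ((x.natAbs : Int) + j + 1)))⟩ := by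
    apply pvFoldl_insert_fresh
    · intro p hp q hq he
      simp only [List.mem_map] at hp
      obtain ⟨j, _, rfl⟩ := hp
      rcases List.mem_append.1 hq with hq | hq
      · exact hfresh q hq (by rw [he])
      · simp only [pvUp, List.mem_map] at hq
        obtain ⟨j', _, rfl⟩ := hq
        simp only [Prod.mk.injEq] at he
        omega
    · rw [List.map_map]
      exact List.nodup_range.map (fun a b h => by
        simp only [Function.comp_apply, Prod.mk.injEq] at h; omega)
  rw [htail]
  congr 1
  rw [List.append_assoc]
  congr 1
  -- pvUp ++ tail = pvRow
  unfold pvRow pvYs pvUp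
  rw [List.map_append, List.map_map, List.map_map]
  congr 1
  all_goals
    apply List.map_congr_left
    intro j _
    simp only [Function.comp_apply, Prod.mk.injEq, Int.abs_eq_natAbs, true_and]
    first | trivial | omega

lemma pvRow_fst (M : Nat) (x : Int) : ∀ p ∈ pvRow M x, p.1.1 = x := by
  intro p hp
  simp only [pvRow, List.mem_map] at hp
  obtain ⟨y, _, rfl⟩ := hp
  rfl

lemma pvYs_nodup (k : Nat) : (pvYs k).Nodup := by
  unfold pvYs
  rw [List.nodup_append]
  refine ⟨List.nodup_range.map (fun a b hab => by omega),
          List.nodup_range.map (fun a b hab => by omega), ?_⟩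
  intro a ha b hb
  simp only [List.mem_map, List.mem_range] at ha hb
  obtain ⟨j, _, rfl⟩ := ha; obtain ⟨j', _, rfl⟩ := hb
  omega

lemma pvYs_mem (k : Nat) (y : Int) (h1 : -(k:Int) ≤ y) (h2 : y ≤ (k:Int)) : y ∈ pvYs k := by
  unfold pvYs
  rw [List.mem_append]
  rcases le_or_gt 0 y with hy | hy
  · left
    exact List.mem_map.2 ⟨y.toNat, List.mem_range.2 (by omega), by omega⟩
  · right
    exact List.mem_map.2 ⟨(-1 - y).toNat, List.mem_range.2 (by omega), by omega⟩

lemma pvGood_flat (M : Nat) (xs : List Int) :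
    ∀ q ∈ xs.flatMap (pvRow M), q.2 = |q.1.1| + |q.1.2| := by
  intro q hq
  obtain ⟨x, _, hq⟩ := List.mem_flatMap.1 hq
  simp only [pvRow, List.mem_map] at hq
  obtain ⟨y, _, rfl⟩ := hq
  rfl

lemma pvFst_flat (M : Nat) (xs : List Int) :
    ∀ q ∈ xs.flatMap (pvRow M), q.1.1 ∈ xs := by
  intro q hq
  obtain ⟨x, hx, hq⟩ := List.mem_flatMap.1 hq
  simp only [pvRow, List.mem_map] at hq
  obtain ⟨y, _, rfl⟩ := hq
  exact hx

-- a row whose entries are all already present (with the canonical values) is a no-op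

lemma pvRowOp_noop (M : Nat) (x : Int) (d : PySem.Dict (Int × Int) Int)
    (hgood : ∀ q ∈ d.items, q.2 = |q.1.1| + |q.1.2|)
    (hmem : ∀ y : Int, -((M:Int) - x.natAbs) ≤ y → y ≤ (M:Int) - x.natAbs → x.natAbs ≤ M →
      ((x, y), (|x| + |y| : Int)) ∈ d.items)
    (hxM : x.natAbs ≤ M) :
    pvRowOp M x d = d := by
  unfold pvRowOp
  have key : ∀ (j : Nat), j ≤ M - x.natAbs → ∀ (y : Int), y = (j:Int) ∨ y = -(j:Int) →
      ((x, y), ((x.natAbs : Int) + j)) ∈ d.items ∧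
      ∀ q ∈ d.items, q.1 = (x, y) → q.2 = (x.natAbs : Int) + j := by
    intro j hj y hy
    have habs : |y| = (j : Int) := by rcases hy with rfl | rfl <;> simp [abs_of_nonneg]
    have hv : (|x| + |y| : Int) = (x.natAbs : Int) + j := by
      rw [habs, Int.abs_eq_natAbs]
    have hm : ((x, y), ((x.natAbs : Int) + j)) ∈ d.items := by
      rw [← hv]
      apply hmem y (by omega) (by omega) hxM
    refine ⟨hm, ?_⟩
    intro q hq hk
    rw [hgood q hq, hk, hv]
  have hup : (pvUp M x).foldl pvIns d = d := by
    apply pvFoldl_insert_noop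
    intro p hp
    simp only [pvUp, List.mem_map] at hp
    obtain ⟨j, hj, rfl⟩ := hp
    exact key j (by simp at hj; omega) _ (Or.inl rfl)
  rw [hup]
  apply pvFoldl_insert_noop
  intro p hp
  simp only [pvDown, List.mem_map] at hp
  obtain ⟨j, hj, rfl⟩ := hp
  exact key j (by simp at hj; omega) _ (Or.inr rfl)

-- processing a list of pairwise-distinct fresh rows appends their entries

lemma pvFoldRows (M : Nat) (xs : List Int) (d : PySem.Dict (Int × Int) Int)
    (hold : ∀ q ∈ d.items, q.1.1 ∉ xs) (hnd : xs.Nodup) :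
    xs.foldl (fun d x => pvRowOp M x d) d = ⟨d.items ++ xs.flatMap (pvRow M)⟩ := by
  induction xs generalizing d with
  | nil => simp
  | cons x t ih =>
    simp only [List.foldl_cons]
    rw [pvRowOp_fresh M x d (fun q hq => by
      intro he; exact hold q hq (by simp [he]))]
    rw [ih ⟨d.items ++ pvRow M x⟩ ?_ (List.nodup_cons.1 hnd).2]
    · simp [pvRow, List.flatMap_cons]
    · intro q hq
      rcases List.mem_append.1 hq with hq | hq
      · intro hmem; exact hold q hq (by simp [hmem])
      · have := pvRow_fst M x q hq
        rw [this]
        exact (List.nodup_cons.1 hnd).1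

def pvXs (M : Nat) : List Int :=
  (List.range (M+1)).map (fun (i : Nat) => (i : Int)) ++ (List.range M).map (fun (i : Nat) => (-1 : Int) - i)

def pvEntries (M : Nat) : List ((Int × Int) × Int) := (pvXs M).flatMap (pvRow M)

lemma pvPyRange_pos (n : Nat) : PySem.List.pyRange 0 (n : Int) 1 = (List.range n).map (fun (k : Nat) => (k : Int)) :=
  PySem.List.pyRange_zero_natCast n

lemma pvXs_nodup (M : Nat) : (pvXs M).Nodup := by
  unfold pvXs
  rw [List.nodup_append]
  refine ⟨List.nodup_range.map (fun a b h => by omega),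
          List.nodup_range.map (fun a b h => by omega), ?_⟩
  intro a ha b hb
  simp only [List.mem_map, List.mem_range] at ha hb
  obtain ⟨i, _, rfl⟩ := ha; obtain ⟨i', _, rfl⟩ := hb
  omega

lemma pvFoldRowsB (M : Nat) (xs : List Int) (d : PySem.Dict (Int × Int) Int)
    (hold : ∀ q ∈ d.items, q.1.1 ∉ xs) (hnd : xs.Nodup) :
    xs.foldl (fun d x => (pvRow M x).foldl pvIns d) d = ⟨d.items ++ xs.flatMap (pvRow M)⟩ := by
  induction xs generalizing d with
  | nil => simp
  | cons x t ih =>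
    simp only [List.foldl_cons]
    have hx : (pvRow M x).foldl pvIns d = ⟨d.items ++ pvRow M x⟩ := by
      apply pvFoldl_insert_fresh
      · intro p hp q hq he
        exact hold q hq (by simp [he, pvRow_fst M x p hp])
      · unfold pvRow
        rw [List.map_map]
        exact (pvYs_nodup _).map (fun a b h => by
          simp only [Function.comp_apply, Prod.mk.injEq] at h; exact h.2)
    rw [hx, ih ⟨d.items ++ pvRow M x⟩ ?_ (List.nodup_cons.1 hnd).2]
    · simp [List.flatMap_cons]
    · intro q hq
      rcases List.mem_append.1 hq with hq | hq
      · intro hmem; exact hold q hq (by simp [hmem])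
      · rw [pvRow_fst M x q hq]
        exact (List.nodup_cons.1 hnd).1

-- B's row of triples: pvRow projected to (x, y, d)

def pvTRow (M : Nat) (x : Int) : List (Int × Int × Int) :=
  (pvRow M x).map (fun p => (p.1.1, p.1.2, p.2))

-- B's widened right row for x = i equals pvTRow

lemma pvB_rightRow (M i : Nat) (hi : i ≤ M) :
    ((PySem.List.pyRange 0 ((M:Int) - (i:Int) + 1) 1).map (fun y => ((i:Int), y, (i:Int) + y)) ++
      (PySem.List.slice ((PySem.List.pyRange 0 ((M:Int) - (i:Int) + 1) 1).map (fun y => ((i:Int), y, (i:Int) + y))) (some 1) none).map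
        (fun t => (t.1, -t.2.1, t.2.2)))
    = pvTRow M (i:Int) := by
  have e1 : (M:Int) - (i:Int) + 1 = ((M - i + 1 : Nat) : Int) := by omega
  rw [e1, pvPyRange_pos, List.map_map, PySem.List.slice_from_one]
  have htail : ((List.range (M - i + 1)).map ((fun y => ((i:Int), y, (i:Int) + y)) ∘ (fun (k : Nat) => (k:Int)))).tail
      = (List.range (M - i)).map (((fun y => ((i:Int), y, (i:Int) + y)) ∘ (fun (k : Nat) => (k:Int))) ∘ Nat.succ) := by
    rw [List.range_succ_eq_map, List.map_cons, List.tail_cons, List.map_map]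
  rw [htail, List.map_map]
  unfold pvTRow pvRow pvYs
  rw [Int.natAbs_natCast]
  simp only [List.map_append, List.map_map]
  congr 1
  · apply List.map_congr_left
    intro j _
    simp only [Function.comp_apply]
    refine congrArg₂ Prod.mk rfl (congrArg₂ Prod.mk rfl ?_)
    rw [Int.abs_natCast, Int.abs_natCast]
  · apply List.map_congr_left
    intro j _
    simp only [Function.comp_apply]
    refine congrArg₂ Prod.mk rfl (congrArg₂ Prod.mk ?_ ?_)
    · push_cast; ring
    · rw [Int.abs_natCast, show |(-1:Int) - (j:Int)| = (j:Int) + 1 from by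
        rw [abs_of_nonpos (by omega : (-1:Int) - (j:Int) ≤ 0)]; ring]
      push_cast; ring

-- negating x turns the right row for i+1 into the canonical row for -(i+1)

lemma pvB_leftRow (M i : Nat) :
    (pvTRow M ((i:Int) + 1)).map (fun t => (-t.1, t.2.1, t.2.2)) = pvTRow M ((-1:Int) - i) := by
  unfold pvTRow pvRow
  rw [List.map_map, List.map_map, List.map_map]
  have h1 : ((i:Int) + 1).natAbs = i + 1 := by omega
  have h2 : ((-1:Int) - i).natAbs = i + 1 := by omega
  rw [h1, h2]
  apply List.map_congr_left
  intro y _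
  simp only [Function.comp_apply]
  rw [show |(-1:Int) - (i:Int)| = |(i:Int) + 1| from by
    rw [abs_of_nonpos (by omega : (-1:Int) - (i:Int) ≤ 0), abs_of_nonneg (by omega : (0:Int) ≤ (i:Int) + 1)]; ring]
  rw [show -((i:Int) + 1) = (-1:Int) - (i:Int) from by ring]

lemma pvB_dict (M : Nat) :
    make_possible_offsets_alt (M : Int) = (pvEntries M).map (fun p => (p.1.1, p.1.2, p.2)) := by
  unfold make_possible_offsets_alt
  dsimp only
  have hxs : PySem.List.pyRange 0 ((M:Int) + 1) 1 = (List.range (M+1)).map (fun (i : Nat) => (i : Int)) := by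
    rw [show ((M:Int) + 1) = ((M+1 : Nat) : Int) by push_cast; ring, pvPyRange_pos]
  rw [hxs, List.map_map, List.map_map]
  -- the right half is the rows pvTRow M 0, …, pvTRow M M
  have hright : (List.range (M+1)).map (((fun row =>
        row ++ (PySem.List.slice row (some 1) none).map (fun t => (t.1, -t.2.1, t.2.2))) ∘
      (fun x => (PySem.List.pyRange 0 ((M:Int) - x + 1) 1).map (fun y => (x, y, x + y)))) ∘ (fun (i : Nat) => (i : Int)))
      = (List.range (M+1)).map (fun (i : Nat) => pvTRow M (i:Int)) := by
    apply List.map_congr_left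
    intro i hi
    exact pvB_rightRow M i (by simp at hi; omega)
  rw [hright, PySem.List.slice_from_one]
  rw [List.range_succ_eq_map, List.map_cons, List.tail_cons, List.map_map, List.map_map]
  -- the left half is the rows pvTRow M (-1), …, pvTRow M (-M)
  have hleft : (List.range M).map ((fun row => row.map (fun t => (-t.1, t.2.1, t.2.2))) ∘
      ((fun (i : Nat) => pvTRow M (i:Int)) ∘ Nat.succ))
      = (List.range M).map (fun (i : Nat) => pvTRow M ((-1:Int) - i)) := by
    apply List.map_congr_left
    intro i _
    show (pvTRow M ((Nat.succ i : Nat) : Int)).map (fun t => (-t.1, t.2.1, t.2.2)) = _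
    rw [show ((Nat.succ i : Nat) : Int) = (i:Int) + 1 by push_cast; ring]
    exact pvB_leftRow M i
  rw [hleft]
  -- the concatenated row list is (pvXs M).map (pvTRow M)
  have hrows : (pvTRow M ((0:Nat):Int) :: (List.range M).map ((fun (i : Nat) => pvTRow M (i:Int)) ∘ Nat.succ))
        ++ (List.range M).map (fun (i : Nat) => pvTRow M ((-1:Int) - i))
      = (pvXs M).map (pvTRow M) := by
    unfold pvXs
    rw [List.map_append, List.map_map, List.map_map]
    congr 1
    rw [List.range_succ_eq_map, List.map_cons, List.map_map]
    rfl
  rw [hrows]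
  -- the nested fold over rows of triples is the nested fold of pvIns over pvRow
  rw [List.foldl_map]
  have hbody : (pvXs M).foldl (fun d x => (pvTRow M x).foldl (fun d t => d.insert (t.1, t.2.1) t.2.2) d)
        (PySem.Dict.empty : PySem.Dict (Int × Int) Int)
      = (pvXs M).foldl (fun d x => (pvRow M x).foldl pvIns d)
        (PySem.Dict.empty : PySem.Dict (Int × Int) Int) := by
    apply PySem.List.foldl_congr_mem
    intro d x _
    unfold pvTRow
    rw [List.foldl_map]
    rfl
  rw [hbody, pvFoldRowsB M (pvXs M) PySem.Dict.empty
      (by intro q hq; rw [show (PySem.Dict.empty : PySem.Dict (Int × Int) Int).items = [] from rfl] at hq; cases hq)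
      (pvXs_nodup M)]
  show (((PySem.Dict.empty : PySem.Dict (Int × Int) Int).items ++ (pvXs M).flatMap (pvRow M))).map (fun p => (p.1.1, p.1.2, p.2)) = _
  rw [show (PySem.Dict.empty : PySem.Dict (Int × Int) Int).items = [] from rfl, List.nil_append]
  rfl

lemma pvPyRange_neg0 (n : Nat) : PySem.List.pyRange 0 (-(n : Int)) (-1) = (List.range n).map (fun (k : Nat) => -(k : Int)) := by
  unfold PySem.List.pyRange
  rcases Nat.eq_zero_or_pos n with h | h
  · subst h; simp
  · rw [if_neg (by omega), if_neg (by omega), if_pos (by omega : -(n:Int) < 0)]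
    have hc : ((0 - -(n:Int) + -(-1) - 1) / -(-1)).toNat = n := by
      simp only [neg_neg]; norm_num
    rw [hc]
    apply List.map_congr_left; intro k _; ring

lemma pvEnumerate_map_range {α : Type} (f : Nat → α) (n : Nat) (s : Int) :
    PySem.List.enumerate ((List.range n).map f) s = (List.range n).map (fun (k : Nat) => (s + (k : Int), f k)) := by
  induction n generalizing f s with
  | zero => rfl
  | succ n ih =>
    rw [List.range_succ_eq_map, List.map_cons, List.map_cons, List.map_map, List.map_map]
    show (s, f 0) :: PySem.List.enumerate _ (s+1) = _
    rw [ih]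
    congr 1
    · simp
    · apply List.map_congr_left; intro k _
      simp only [Function.comp_apply, Prod.mk.injEq]
      exact ⟨by push_cast; ring, trivial⟩

-- Right-loop body, for x = i ≥ 0, is the canonical row operation

lemma pvA_posBody (M i : Nat) (hi : i < M + 1) (d : PySem.Dict (Int × Int) Int) :
    (PySem.List.enumerate (PySem.List.pyRange 0 ((-1) * ((M:Int) + 1 - (i:Int))) (-1))).foldl
        (fun d jy => d.insert ((i:Int), jy.2) ((i:Int) + jy.1))
      ((PySem.List.enumerate (PySem.List.pyRange 0 ((M:Int) + 1 - (i:Int)) 1)).foldl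
        (fun d jy => d.insert ((i:Int), jy.2) ((i:Int) + jy.1)) d) = pvRowOp M (i:Int) d := by
  have e1 : (M:Int) + 1 - (i:Int) = ((M - i + 1 : Nat) : Int) := by omega
  have e2 : (-1) * ((M - i + 1 : Nat) : Int) = -((M - i + 1 : Nat) : Int) := by ring
  rw [e1, e2, pvPyRange_pos, pvPyRange_neg0, pvEnumerate_map_range, pvEnumerate_map_range,
      List.foldl_map, List.foldl_map]
  simp only [zero_add]
  unfold pvRowOp pvUp pvDown
  simp only [Int.natAbs_natCast]
  rw [List.foldl_map, List.foldl_map]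
  rfl

-- Left-loop body, for x = -i, is the canonical row operation

lemma pvA_negBody (M i : Nat) (hi : i < M + 1) (d : PySem.Dict (Int × Int) Int) :
    (PySem.List.enumerate (PySem.List.pyRange 0 ((-1) * ((M:Int) + 1 + -(i:Int))) (-1))).foldl
        (fun d jy => d.insert (-(i:Int), jy.2) ((i:Int) + jy.1))
      ((PySem.List.enumerate (PySem.List.pyRange 0 ((M:Int) + 1 + -(i:Int)) 1)).foldl
        (fun d jy => d.insert (-(i:Int), jy.2) ((i:Int) + jy.1)) d) = pvRowOp M (-(i:Int)) d := by
  have e1 : (M:Int) + 1 + -(i:Int) = ((M - i + 1 : Nat) : Int) := by omega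
  have e2 : (-1) * ((M - i + 1 : Nat) : Int) = -((M - i + 1 : Nat) : Int) := by ring
  rw [e1, e2, pvPyRange_pos, pvPyRange_neg0, pvEnumerate_map_range, pvEnumerate_map_range,
      List.foldl_map, List.foldl_map]
  simp only [zero_add]
  unfold pvRowOp pvUp pvDown
  simp only [Int.natAbs_neg, Int.natAbs_natCast]
  rw [List.foldl_map, List.foldl_map]
  rfl

lemma pvPosE_good (M : Nat) :
    ∀ q ∈ ((List.range (M+1)).map (fun (i : Nat) => (i : Int))).flatMap (pvRow M),
      q.2 = |q.1.1| + |q.1.2| := pvGood_flat M _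

lemma pvA_dict (M : Nat) :
    make_possible_offsets (M : Int) = (pvEntries M).map (fun p => (p.1.1, p.1.2, p.2)) := by
  unfold make_possible_offsets
  dsimp only
  have hpos : PySem.List.pyRange 0 ((M:Int) + 1) 1
      = (List.range (M+1)).map (fun (i : Nat) => (i : Int)) := by
    rw [show (M:Int) + 1 = ((M+1 : Nat) : Int) by push_cast; ring, pvPyRange_pos]
  have hneg : PySem.List.pyRange 0 (((M:Int) + 1) * (-1)) (-1)
      = (List.range (M+1)).map (fun (i : Nat) => -(i : Int)) := by
    rw [show ((M:Int) + 1) * (-1) = -((M+1 : Nat) : Int) by push_cast; ring, pvPyRange_neg0]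
  rw [hpos, hneg, pvEnumerate_map_range, pvEnumerate_map_range, List.foldl_map, List.foldl_map]
  simp only [zero_add]
  -- the Right loop builds the positive rows
  have hloop1 : (List.range (M+1)).foldl (fun d (i : Nat) =>
        (PySem.List.enumerate (PySem.List.pyRange 0 ((-1) * ((M:Int) + 1 - (i:Int))) (-1))).foldl
            (fun d jy => d.insert ((i:Int), jy.2) ((i:Int) + jy.1))
          ((PySem.List.enumerate (PySem.List.pyRange 0 ((M:Int) + 1 - (i:Int)) 1)).foldl
            (fun d jy => d.insert ((i:Int), jy.2) ((i:Int) + jy.1)) d))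
        (PySem.Dict.empty : PySem.Dict (Int × Int) Int)
      = ⟨((List.range (M+1)).map (fun (i : Nat) => (i : Int))).flatMap (pvRow M)⟩ := by
    rw [show (List.range (M+1)).foldl (fun d (i : Nat) =>
        (PySem.List.enumerate (PySem.List.pyRange 0 ((-1) * ((M:Int) + 1 - (i:Int))) (-1))).foldl
            (fun d jy => d.insert ((i:Int), jy.2) ((i:Int) + jy.1))
          ((PySem.List.enumerate (PySem.List.pyRange 0 ((M:Int) + 1 - (i:Int)) 1)).foldl
            (fun d jy => d.insert ((i:Int), jy.2) ((i:Int) + jy.1)) d))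
        (PySem.Dict.empty : PySem.Dict (Int × Int) Int)
      = (List.range (M+1)).foldl (fun d (i : Nat) => pvRowOp M (i:Int) d)
        (PySem.Dict.empty : PySem.Dict (Int × Int) Int) from
      PySem.List.foldl_congr_mem _ _ _ _ (fun d i hi => pvA_posBody M i (List.mem_range.1 hi) d)]
    rw [← List.foldl_map (f := fun (i : Nat) => (i : Int)) (g := fun d x => pvRowOp M x d)]
    rw [pvFoldRows M _ PySem.Dict.empty
        (by intro q hq; rw [show (PySem.Dict.empty : PySem.Dict (Int × Int) Int).items = [] from rfl] at hq; cases hq)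
        (List.nodup_range.map (fun a b hab => by omega))]
    rfl
  rw [hloop1]
  -- the Left loop: x = 0 is a no-op, x = -1 … -M are the negative rows
  rw [show (List.range (M+1)).foldl (fun d (i : Nat) =>
      (PySem.List.enumerate (PySem.List.pyRange 0 ((-1) * ((M:Int) + 1 + -(i:Int))) (-1))).foldl
          (fun d jy => d.insert (-(i:Int), jy.2) ((i:Int) + jy.1))
        ((PySem.List.enumerate (PySem.List.pyRange 0 ((M:Int) + 1 + -(i:Int)) 1)).foldl
          (fun d jy => d.insert (-(i:Int), jy.2) ((i:Int) + jy.1)) d))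
      (⟨((List.range (M+1)).map (fun (i : Nat) => (i : Int))).flatMap (pvRow M)⟩ : PySem.Dict (Int × Int) Int)
    = (List.range (M+1)).foldl (fun d (i : Nat) => pvRowOp M (-(i:Int)) d)
      (⟨((List.range (M+1)).map (fun (i : Nat) => (i : Int))).flatMap (pvRow M)⟩ : PySem.Dict (Int × Int) Int) from
    PySem.List.foldl_congr_mem _ _ _ _ (fun d i hi => pvA_negBody M i (List.mem_range.1 hi) d)]
  set posD : PySem.Dict (Int × Int) Int := ⟨((List.range (M+1)).map (fun (i : Nat) => (i : Int))).flatMap (pvRow M)⟩ with hposD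
  rw [List.range_succ_eq_map, List.foldl_cons]
  have h0 : pvRowOp M (-((0:Nat):Int)) posD = posD := by
    rw [hposD]
    rw [show -((0:Nat):Int) = (0:Int) by simp]
    apply pvRowOp_noop
    · exact pvPosE_good M
    · intro y h1 h2 _
      apply List.mem_flatMap.2
      refine ⟨(0:Int), List.mem_map.2 ⟨0, List.mem_range.2 (by omega), by simp⟩, ?_⟩
      unfold pvRow
      refine List.mem_map.2 ⟨y, ?_, rfl⟩
      have hab : ((0:Int)).natAbs = 0 := rfl
      rw [hab] at h1 h2 ⊢
      exact pvYs_mem (M - 0) y (by omega) (by omega)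
    · simp
  rw [h0]
  rw [List.foldl_map]
  rw [show (List.range M).foldl (fun d (i : Nat) => pvRowOp M (-((Nat.succ i : Nat):Int)) d)
      (⟨((List.range (M+1)).map (fun (i : Nat) => (i : Int))).flatMap (pvRow M)⟩ : PySem.Dict (Int × Int) Int)
    = (List.range M).foldl (fun d (i : Nat) => pvRowOp M (-((i:Int)+1)) d)
      (⟨((List.range (M+1)).map (fun (i : Nat) => (i : Int))).flatMap (pvRow M)⟩ : PySem.Dict (Int × Int) Int) from
    PySem.List.foldl_congr_mem _ _ _ _ (fun d i hi => by
      have hc : ((Nat.succ i : Nat) : Int) = (i:Int) + 1 := by push_cast; ring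
      rw [hc])]
  rw [← List.foldl_map (f := fun (i : Nat) => -((i:Int) + 1)) (g := fun d x => pvRowOp M x d)]
  rw [pvFoldRows M _ _ ?hold ?hnd]
  case hold =>
    intro q hq hmem
    have h1 := pvFst_flat M _ q hq
    simp only [List.mem_map, List.mem_range] at h1 hmem
    obtain ⟨i', _, he1⟩ := h1
    obtain ⟨j, _, he2⟩ := hmem
    omega
  case hnd => exact List.nodup_range.map (fun a b hab => by omega)
  have hxs2 : (List.range M).map (fun (i : Nat) => -((i:Int) + 1))
      = (List.range M).map (fun (i : Nat) => (-1 : Int) - i) :=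
    List.map_congr_left (fun i _ => by ring)
  rw [hxs2]
  show (((List.range (M+1)).map (fun (i : Nat) => (i : Int))).flatMap (pvRow M) ++
      ((List.range M).map (fun (i : Nat) => (-1 : Int) - i)).flatMap (pvRow M)).map (fun p => (p.1.1, p.1.2, p.2)) = _
  rw [← List.flatMap_append]
  rfl

lemma pvA_neg (m : Int) (h : m < 0) : make_possible_offsets m = [] := by
  unfold make_possible_offsets
  dsimp only
  have h1 : PySem.List.pyRange 0 (m + 1) 1 = [] := by
    unfold PySem.List.pyRange
    rw [if_neg (by norm_num : ¬ (1:Int) = 0), if_pos (by norm_num : (0:Int) < 1),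
        if_neg (by omega : ¬ (0:Int) < m + 1)]
    simp
  have h2 : PySem.List.pyRange 0 ((m + 1) * (-1)) (-1) = [] := by
    unfold PySem.List.pyRange
    rw [if_neg (by norm_num : ¬ (-1:Int) = 0), if_neg (by norm_num : ¬ (0:Int) < -1),
        if_neg (by omega : ¬ (m + 1) * (-1) < 0)]
    simp
  rw [h1, h2]
  rfl

lemma pvB_neg (m : Int) (h : m < 0) : make_possible_offsets_alt m = [] := by
  unfold make_possible_offsets_alt
  dsimp only
  have h1 : PySem.List.pyRange 0 (m + 1) 1 = [] := by
    unfold PySem.List.pyRange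
    rw [if_neg (by norm_num : ¬ (1:Int) = 0), if_pos (by norm_num : (0:Int) < 1),
        if_neg (by omega : ¬ (0:Int) < m + 1)]
    simp
  rw [h1]
  rfl

-- ===== VERDICT (by name: the statement is the Claim_ definition above) =====
theorem make_possible_offsets_spec : Claim_equal_make_possible_offsets := by
  intro m _
  unfold Spec_make_possible_offsets
  rcases lt_or_ge m 0 with hm | hm
  · rw [pvA_neg m hm, pvB_neg m hm]
  · obtain ⟨M, rfl⟩ : ∃ M : Nat, m = (M : Int) := ⟨m.toNat, (Int.toNat_of_nonneg hm).symm⟩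
    rw [pvA_dict, pvB_dict]
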